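-- pv_equiv track=rewrite | github.com/MacHu-GWU/Learn-AWS-Lambda | example-projects/dice-gamble-project/awslambda.py | explain
-- ===== SOURCE A (Python) =====
-- def explain(bowl):
--     """赌骰子秘籍: http://blog.sina.com.cn/s/blog_4c8894390101384t.html
--
--     baozi: x24
--     4/17: x50
--     5/16: x18
--     6/15: x14
--     7/14: x12
--     8/13: x8
--     9/10/11/12: x6
--     big/small: x1
--     1-/2-/3-/4-/5-/6-: x1
--     """
--     terms = list()
--     if bowl[0] == bowl[1] == bowl[2]:
--         is_baozi = True
--         terms.append("baozi")
--     else: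
--         is_baozi = False
--
--     if not is_baozi:
--         total = sum(bowl)
--         terms.append(str(total))
--
--         if total >= 11:
--             terms.append("big")
--         else:
--             terms.append("small")
--
--         for i in range(1, 1+6):
--             if i in bowl:
--                 terms.append("%s-" % i)
--
--     return terms
-- ===== SOURCE B (Python) =====
-- def explain(bowl):
--     if bowl[0] == bowl[1] == bowl[2]:
--         return ["baozi"]
--     total = sum(bowl)
--     terms = [str(total), "big" if total >= 11 else "small"]
--     prev = None
--     for x in sorted(bowl):
--         if 1 <= x <= 6 and x != prev:
--             terms.append("%s-" % x)
--             prev = x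
--     return terms
-- ===== Notes on version B (the rewrite author's own statement) =====
-- stated objective: alternative
-- what changed: The face-listing step no longer probes each candidate face 1..6 with a membership scan of the dice; B sorts the whole bowl once and does a single stateful scan over the sorted dice, emitting each in-range value the first time it appears (adjacent-duplicate suppression via a prev accumulator), with an early return for baozi.
import Mathlib
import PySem

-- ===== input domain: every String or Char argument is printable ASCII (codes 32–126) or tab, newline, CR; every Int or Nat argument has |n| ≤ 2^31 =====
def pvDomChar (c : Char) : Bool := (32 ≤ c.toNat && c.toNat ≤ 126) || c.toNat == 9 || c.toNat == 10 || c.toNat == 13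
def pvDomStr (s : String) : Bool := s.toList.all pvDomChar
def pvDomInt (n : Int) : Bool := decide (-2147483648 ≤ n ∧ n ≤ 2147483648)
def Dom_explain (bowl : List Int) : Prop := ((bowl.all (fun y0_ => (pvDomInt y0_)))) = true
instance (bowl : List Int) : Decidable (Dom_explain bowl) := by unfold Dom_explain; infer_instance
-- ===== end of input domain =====

-- B sorts the bowl once and lists the faces by a single stateful scan over the sorted dice
-- (adjacent-duplicate suppression) instead of probing each candidate face 1..6 for membership.


-- ===== PORT A =====
-- bowl[0]/bowl[1]/bowl[2] via pyGetD: Pre_explain guarantees every index Python actually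
-- evaluates (the chained comparison short-circuits) is in range.
def explain (bowl : List Int) : List String :=
  let terms : List String := []
  if PySem.List.pyGetD bowl 0 0 = PySem.List.pyGetD bowl 1 0 ∧
     PySem.List.pyGetD bowl 1 0 = PySem.List.pyGetD bowl 2 0 then
    terms ++ ["baozi"]
  else
    let total := bowl.sum
    let terms := terms ++ [PySem.Int.toStr total]
    let terms := if total ≥ 11 then terms ++ ["big"] else terms ++ ["small"]
    (PySem.List.pyRange 1 7 1).foldl
      (fun t i => if bowl.contains i then t ++ [PySem.Int.toStr i ++ "-"] else t) terms

-- ===== PORT B =====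
def explain_alt (bowl : List Int) : List String :=
  if PySem.List.pyGetD bowl 0 0 = PySem.List.pyGetD bowl 1 0 ∧
     PySem.List.pyGetD bowl 1 0 = PySem.List.pyGetD bowl 2 0 then
    ["baozi"]
  else
    let total := bowl.sum
    let terms := [PySem.Int.toStr total, if total ≥ 11 then "big" else "small"]
    -- for x in sorted(bowl): if 1 <= x <= 6 and x != prev: append; prev = x
    ((PySem.List.sorted bowl (fun x => x) false).foldl
      (fun (s : List String × Option Int) x =>
        if 1 ≤ x ∧ x ≤ 6 ∧ some x ≠ s.2 then (s.1 ++ [PySem.Int.toStr x ++ "-"], some x) else s)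
      (terms, none)).1

-- ===== PRECONDITION & SPEC =====
-- Pre_ excludes exactly the inputs where both Pythons raise IndexError: fewer than two dice,
-- or exactly two dice whose equality makes the chained comparison reach the missing bowl[2].
def Pre_explain (bowl : List Int) : Prop :=
  3 ≤ bowl.length ∨ (bowl.length = 2 ∧ bowl.getD 0 0 ≠ bowl.getD 1 0)
instance (bowl : List Int) : Decidable (Pre_explain bowl) := by unfold Pre_explain; infer_instance
def pvWitness_explain : List Int := ([1, 2, 3])
def Spec_explain (bowl : List Int) (out : List String) : Prop := out = explain_alt bowl
instance (bowl : List Int) (out : List String) : Decidable (Spec_explain bowl out) := by unfold Spec_explain; infer_instance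

-- ===== CLAIM (what is proved, stated in full; the proofs are below) =====
def Claim_equal_explain : Prop := ∀ (bowl : List Int), Dom_explain bowl → Pre_explain bowl → Spec_explain bowl (explain bowl)

-- ===== LEMMAS AND PROOFS =====

-- The integer faces B's scan emits, abstracted away from the string accumulator.
def dfaces : List Int → Option Int → List Int
  | [], _ => []
  | x :: xs, prev =>
    if 1 ≤ x ∧ x ≤ 6 ∧ some x ≠ prev then x :: dfaces xs (some x) else dfaces xs prev

lemma fold_faces (l : List Int) (terms : List String) (prev : Option Int) :
    (l.foldl
      (fun (s : List String × Option Int) x =>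
        if 1 ≤ x ∧ x ≤ 6 ∧ some x ≠ s.2 then (s.1 ++ [PySem.Int.toStr x ++ "-"], some x) else s)
      (terms, prev)).1
    = terms ++ (dfaces l prev).map (fun i => PySem.Int.toStr i ++ "-") := by
  induction l generalizing terms prev with
  | nil => simp [dfaces]
  | cons x xs ih =>
    by_cases h : 1 ≤ x ∧ x ≤ 6 ∧ some x ≠ prev <;> simp [dfaces, h, ih]

lemma dfaces_spec (l : List Int) (prev : Option Int)
    (hs : l.Pairwise (· ≤ ·))
    (hp : ∀ p, prev = some p → ∀ y ∈ l, p ≤ y) :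
    (dfaces l prev).Pairwise (· < ·) ∧
      ∀ a, a ∈ dfaces l prev ↔ a ∈ l ∧ 1 ≤ a ∧ a ≤ 6 ∧ prev ≠ some a := by
  induction l generalizing prev with
  | nil => simp [dfaces]
  | cons x xs ih =>
    have hxle : ∀ y ∈ xs, x ≤ y := fun y hy => (List.pairwise_cons.mp hs).1 y hy
    have hs' := (List.pairwise_cons.mp hs).2
    by_cases h : 1 ≤ x ∧ x ≤ 6 ∧ some x ≠ prev
    · have ihx := ih (some x) hs' (by rintro p hp' y hy; cases hp'; exact hxle y hy)
      constructor
      · rw [dfaces, if_pos h]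
        refine List.pairwise_cons.mpr ⟨?_, ihx.1⟩
        intro a ha
        have := (ihx.2 a).mp ha
        have hax : a ≠ x := fun he => this.2.2.2 (by rw [he])
        exact lt_of_le_of_ne (hxle a this.1) (Ne.symm hax)
      · intro a
        rw [dfaces, if_pos h]
        simp only [List.mem_cons, ihx.2 a]
        constructor
        · rintro (rfl | ⟨ha, h1, h6, hax⟩)
          · exact ⟨Or.inl rfl, h.1, h.2.1, fun hpe => h.2.2 hpe.symm⟩
          · refine ⟨Or.inr ha, h1, h6, ?_⟩
            intro hpe
            have hpx : a ≤ x := hp a hpe x (List.mem_cons_self ..)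
            have hxa : x ≤ a := hxle a ha
            exact hax (by cases le_antisymm hxa hpx; rfl)
        · rintro ⟨hx | ha, h1, h6, hap⟩
          · exact Or.inl hx
          · by_cases hax : a = x
            · exact Or.inl hax
            · exact Or.inr ⟨ha, h1, h6, fun he => hax (Option.some.inj he.symm)⟩
    · -- skipped: out of range, or equal to prev
      have hp' : ∀ p, prev = some p → ∀ y ∈ xs, p ≤ y := by
        rintro p rfl y hy
        have hpx : p ≤ x := hp p rfl x (List.mem_cons_self ..)
        exact le_trans hpx (hxle y hy)
      have ihx := ih prev hs' hp'
      rw [dfaces, if_neg h]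
      refine ⟨ihx.1, fun a => ?_⟩
      rw [ihx.2 a]
      simp only [List.mem_cons]
      constructor
      · rintro ⟨ha, h1, h6, hap⟩; exact ⟨Or.inr ha, h1, h6, hap⟩
      · rintro ⟨hx | ha, h1, h6, hap⟩
        · exfalso
          subst hx
          exact h ⟨h1, h6, fun he => hap he.symm⟩
        · exact ⟨ha, h1, h6, hap⟩

-- B's emitted faces are exactly A's ascending probe results.
lemma dfaces_sorted (bowl : List Int) :
    dfaces (PySem.List.sorted bowl (fun x => x) false) none
      = (PySem.List.pyRange 1 7 1).filter (fun i => bowl.contains i) := by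
  have hs : (PySem.List.sorted bowl (fun x => x) false).Pairwise (· ≤ ·) :=
    PySem.List.sorted_pairwise bowl (fun x => x)
  obtain ⟨hlt, hmem⟩ := dfaces_spec _ none hs (by rintro p ⟨⟩)
  have hperm : (dfaces (PySem.List.sorted bowl (fun x => x) false) none).Perm
      ((PySem.List.pyRange 1 7 1).filter (fun i => bowl.contains i)) := by
    rw [List.perm_ext_iff_of_nodup hlt.nodup
        (((PySem.List.nodup_pyRange_one 1 7).filter _))]
    intro a
    rw [hmem a]
    simp [PySem.List.mem_pyRange_one, PySem.List.mem_sorted]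
    have : a < 7 ↔ a ≤ 6 := by omega
    tauto
  exact hperm.eq_of_pairwise (fun a b _ _ h1 h2 => le_antisymm h1.le h2.le) hlt
    ((PySem.List.pairwise_lt_pyRange_one 1 7).filter _)

-- ===== VERDICT (by name: the statement is the Claim_ definition above) =====
theorem explain_spec : Claim_equal_explain := by
  intro bowl _ _
  unfold Spec_explain explain explain_alt
  split
  · rfl
  · rw [fold_faces, dfaces_sorted]
    simp only [PySem.List.foldl_append_if]
    have hf : (PySem.List.pyRange 1 7 1).filter bowl.contains
        = (PySem.List.pyRange 1 7 1).filter (fun i => decide (i ∈ bowl)) :=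
      List.filter_congr (fun x _ => by simp)
    rw [hf]
    by_cases hs : (11:Int) ≤ bowl.sum <;> simp [hs]
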